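-- pv_equiv track=rewrite | github.com/anchapin/pAIssive_income | scripts/validate_dependencies.py | check_missing_security_tools
-- ===== SOURCE A (Python) =====
-- from typing import Dict, List, Set, Tuple
--
-- def check_missing_security_tools(files_packages: Dict[str, Dict[str, str]]) -> List[str]:
--     """Check for missing security tools."""
--     security_tools = ['safety', 'bandit', 'click']
--     missing_tools = []
--
--     # Check if security tools are present in any requirements file
--     all_packages: Set[str] = set()
--     for packages in files_packages.values():
--         all_packages.update(packages.keys())
--
--     for tool in security_tools:
--         if tool not in all_packages:
--             missing_tools.append(tool)
--
--     return missing_tools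
-- ===== SOURCE B (Python) =====
-- from typing import Dict, List
--
-- def check_missing_security_tools(files_packages: Dict[str, Dict[str, str]]) -> List[str]:
--     """Check for missing security tools (per-tool scan over the files, no index)."""
--     return [
--         tool
--         for tool in ['safety', 'bandit', 'click']
--         if not any(tool in pkgs for pkgs in files_packages.values())
--     ]
-- ===== Notes on version B (the rewrite author's own statement) =====
-- stated objective: simpler
-- what changed: Drops the pre-built union set of all package names; B instead tests each of the three fixed tools directly with any() over the files' key sets, in one comprehension.
import Mathlib
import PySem

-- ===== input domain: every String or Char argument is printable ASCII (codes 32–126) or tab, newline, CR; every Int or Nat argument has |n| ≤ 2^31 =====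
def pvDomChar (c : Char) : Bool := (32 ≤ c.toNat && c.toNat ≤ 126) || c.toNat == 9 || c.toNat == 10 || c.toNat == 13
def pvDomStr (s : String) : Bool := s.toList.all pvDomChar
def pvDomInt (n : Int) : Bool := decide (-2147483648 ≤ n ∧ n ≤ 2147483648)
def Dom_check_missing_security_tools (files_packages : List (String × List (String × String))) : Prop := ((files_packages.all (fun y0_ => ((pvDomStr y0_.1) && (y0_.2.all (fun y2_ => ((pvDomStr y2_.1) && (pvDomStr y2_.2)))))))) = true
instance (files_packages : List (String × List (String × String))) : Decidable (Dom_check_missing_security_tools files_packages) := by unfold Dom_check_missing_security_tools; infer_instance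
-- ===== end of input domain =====

-- B drops A's pre-built union set of package names and tests each fixed tool directly against the files; same result, simpler shape.

-- ===== PORT A =====
def check_missing_security_tools (files_packages : List (String × List (String × String))) : List String :=
  let security_tools : List String := ["safety", "bandit", "click"]
  -- all_packages = set(); for packages in files_packages.values(): all_packages.update(packages.keys())
  let all_packages : PySem.Set String :=
    files_packages.foldl (fun s pr => PySem.Set.update s (pr.2.map Prod.fst)) PySem.Set.empty
  -- for tool in security_tools: if tool not in all_packages: missing_tools.append(tool)
  security_tools.foldl
    (fun missing_tools tool =>
      if PySem.Set.contains all_packages tool then missing_tools else missing_tools ++ [tool]) []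

-- ===== PORT B =====
def check_missing_security_tools_alt (files_packages : List (String × List (String × String))) : List String :=
  ["safety", "bandit", "click"].filter
    (fun tool => !(files_packages.any (fun pr => pr.2.any (fun p => p.1 == tool))))

-- ===== PRECONDITION & SPEC =====
def Spec_check_missing_security_tools (files_packages : List (String × List (String × String))) (out : List String) : Prop := out = check_missing_security_tools_alt files_packages
instance (files_packages : List (String × List (String × String))) (out : List String) : Decidable (Spec_check_missing_security_tools files_packages out) := by unfold Spec_check_missing_security_tools; infer_instance

-- ===== CLAIM (what is proved, stated in full; the proofs are below) =====
def Claim_equal_check_missing_security_tools : Prop := ∀ (files_packages : List (String × List (String × String))), Dom_check_missing_security_tools files_packages → Spec_check_missing_security_tools files_packages (check_missing_security_tools files_packages)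

-- ===== LEMMAS AND PROOFS =====

-- membership in A's accumulated union set = some file's assoc list carries the key
theorem mem_fold_update (fp : List (String × List (String × String))) (s : PySem.Set String) (y : String) :
    y ∈ fp.foldl (fun s pr => PySem.Set.update s (pr.2.map Prod.fst)) s ↔
      y ∈ s ∨ ∃ pr ∈ fp, ∃ p ∈ pr.2, p.1 = y := by
  induction fp generalizing s with
  | nil => simp
  | cons hd tl ih =>
      simp [List.foldl, ih, PySem.Set.mem_update]
      tauto

-- A's single set lookup = B's scan over the files, for any tool
theorem contains_fold_eq_any (fp : List (String × List (String × String))) (t : String) :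
    PySem.Set.contains
        (fp.foldl (fun s pr => PySem.Set.update s (pr.2.map Prod.fst)) PySem.Set.empty) t
      = fp.any (fun pr => pr.2.any (fun p => p.1 == t)) := by
  rw [PySem.Set.contains_eq_listContains, Bool.eq_iff_iff]
  simp [mem_fold_update, PySem.Set.empty]

-- ===== VERDICT (by name: the statement is the Claim_ definition above) =====
theorem check_missing_security_tools_spec : Claim_equal_check_missing_security_tools := by
  intro fp _
  unfold Spec_check_missing_security_tools check_missing_security_tools check_missing_security_tools_alt
  simp only [List.foldl, List.filter, contains_fold_eq_any]
  rcases Bool.eq_false_or_eq_true (fp.any (fun pr => pr.2.any (fun p => p.1 == "safety"))) with h1 | h1 <;>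
  rcases Bool.eq_false_or_eq_true (fp.any (fun pr => pr.2.any (fun p => p.1 == "bandit"))) with h2 | h2 <;>
  rcases Bool.eq_false_or_eq_true (fp.any (fun pr => pr.2.any (fun p => p.1 == "click"))) with h3 | h3 <;>
    simp [h1, h2, h3]
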